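-- pv_equiv track=rewrite | github.com/HashirSalam/ScrapperFilter | keyCombo/headings_and_content v2.py | check_for_q
-- ===== SOURCE A (Python) =====
-- def check_for_q(words):
--     if "?" in words:
--         return True
--     words = words.lower()
--     q_words = ["how ", "what ", "who ", "when ", "does ", "can ", "vs ", "versus "]
--     for each in q_words:
--         if words.startswith(each):
--             return True
--         if " " + each in words:
--             return True
-- ===== SOURCE B (Python) =====
-- def check_for_q(words):
--     if "?" in words:
--         return True
--     w = words.lower()
--     qs = ("how ", "what ", "who ", "when ", "does ", "can ", "vs ", "versus ")
--     if any(w.startswith(qs, i) for i in range(len(w)) if i == 0 or w[i - 1] == " "):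
--         return True
-- ===== Notes on version B (the rewrite author's own statement) =====
-- stated objective: alternative
-- what changed: Replaces A's eight per-keyword passes (a startswith plus a substring scan for each question word) with a single pass over the positions of the lowercased string that tests a tuple-startswith only at word boundaries (i == 0 or a space just before i), expressed as one any(...) generator.
import Mathlib
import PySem

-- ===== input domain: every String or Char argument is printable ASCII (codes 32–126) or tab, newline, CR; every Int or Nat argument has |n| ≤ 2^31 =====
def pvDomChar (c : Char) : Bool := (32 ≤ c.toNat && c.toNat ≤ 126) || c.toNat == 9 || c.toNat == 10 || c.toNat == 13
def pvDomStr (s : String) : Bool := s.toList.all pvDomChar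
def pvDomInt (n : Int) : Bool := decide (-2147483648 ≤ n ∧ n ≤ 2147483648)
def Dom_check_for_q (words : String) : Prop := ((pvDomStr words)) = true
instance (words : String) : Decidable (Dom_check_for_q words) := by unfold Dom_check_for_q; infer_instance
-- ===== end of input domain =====

-- B replaces A's eight per-keyword scans with one pass over word-boundary positions; objective: alternative single-pass formulation.

-- ===== PORT A =====
-- A scans the (lowercased) string once per question word: startswith, then substring search for " "+word.
def pvQWordsA : List (List Char) :=
  ["how ".toList, "what ".toList, "who ".toList, "when ".toList,
   "does ".toList, "can ".toList, "vs ".toList, "versus ".toList]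

def pvLoopA (w : List Char) : List (List Char) → Option Bool
  | [] => none
  | each :: rest =>
      if PySem.Chars.startswith w each then some true
      else if PySem.Chars.isIn (' ' :: each) w then some true
      else pvLoopA w rest

def check_for_q (words : String) : Option Bool :=
  if PySem.Str.isIn "?" words then some true
  else pvLoopA (PySem.Chars.lower words.toList) pvQWordsA

-- ===== PORT B =====
-- B: one pass over the positions of the lowercased string, testing a tuple-startswith
-- at every word boundary (i = 0 or a space just before i). pvQsB is B's local tuple qs.
def pvQsB : List (List Char) :=
  ["how ".toList, "what ".toList, "who ".toList, "when ".toList,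
   "does ".toList, "can ".toList, "vs ".toList, "versus ".toList]

def check_for_q_alt (words : String) : Option Bool :=
  if PySem.Str.isIn "?" words then some true
  else
    let w := PySem.Chars.lower words.toList
    if (List.range w.length).any (fun i =>
        (decide (i = 0) || decide (w[i - 1]? = some ' ')) &&
        pvQsB.any (fun q => q.isPrefixOf (w.drop i)))
    then some true else none

-- ===== PRECONDITION & SPEC =====
def Spec_check_for_q (words : String) (out : Option Bool) : Prop := out = check_for_q_alt words
instance (words : String) (out : Option Bool) : Decidable (Spec_check_for_q words out) := by unfold Spec_check_for_q; infer_instance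

-- ===== CLAIM (what is proved, stated in full; the proofs are below) =====
def Claim_equal_check_for_q : Prop := ∀ (words : String), Dom_check_for_q words → Spec_check_for_q words (check_for_q words)

-- ===== LEMMAS AND PROOFS =====

lemma pvLoopA_eq_some_true_iff (w : List Char) (l : List (List Char)) :
    pvLoopA w l = some true ↔
      ∃ kw ∈ l, PySem.Chars.startswith w kw = true ∨ PySem.Chars.isIn (' ' :: kw) w = true := by
  induction l with
  | nil => simp [pvLoopA]
  | cons each rest ih =>
      simp only [pvLoopA]
      split_ifs with h1 h2 <;> simp_all

lemma pvLoopA_ne_some_false (w : List Char) (l : List (List Char)) :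
    pvLoopA w l ≠ some false := by
  induction l with
  | nil => simp [pvLoopA]
  | cons each rest ih =>
      simp only [pvLoopA]
      split_ifs <;> simp_all

lemma pvInfix_iff_prefix_drop (sub w : List Char) :
    sub <:+: w ↔ ∃ j, sub <+: w.drop j := by
  rw [← PySem.Chars.isIn_iff_infix, ← PySem.Chars.exists_prefix_drop_iff_isIn]

lemma pvAnyB_iff (w : List Char) :
    ((List.range w.length).any (fun i =>
        (decide (i = 0) || decide (w[i - 1]? = some ' ')) &&
        pvQsB.any (fun q => q.isPrefixOf (w.drop i))) = true) ↔
      ∃ q ∈ pvQsB, q <+: w ∨ (' ' :: q) <:+: w := by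
  have hne : ∀ q ∈ pvQsB, q ≠ [] := by decide
  simp only [List.any_eq_true, List.mem_range, Bool.and_eq_true, Bool.or_eq_true,
    decide_eq_true_eq, List.isPrefixOf_iff_prefix]
  constructor
  · rintro ⟨i, hi, hguard, q, hq, hpre⟩
    cases i with
    | zero => exact ⟨q, hq, Or.inl (by simpa using hpre)⟩
    | succ j =>
        have hsp : w[j]? = some ' ' := by
          rcases hguard with h0 | hsp
          · omega
          · simpa using hsp
        refine ⟨q, hq, Or.inr ?_⟩
        rw [pvInfix_iff_prefix_drop]
        refine ⟨j, ?_⟩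
        have hjl : j < w.length := by omega
        have hdrop : w.drop j = ' ' :: w.drop (j + 1) := by
          rw [List.drop_eq_getElem_cons hjl]
          have hg : w[j] = ' ' := by
            have := List.getElem?_eq_getElem hjl
            rw [this] at hsp; exact Option.some.inj hsp
          rw [hg]
        rw [hdrop]
        exact (List.prefix_cons_inj (' ')).mpr hpre
  · rintro ⟨q, hq, hpre | hinf⟩
    · refine ⟨0, ?_, Or.inl rfl, q, hq, by simpa using hpre⟩
      have : q ≠ [] := hne q hq
      cases w with
      | nil => exact absurd (List.prefix_nil.mp hpre) this
      | cons c t => simp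
    · rw [pvInfix_iff_prefix_drop] at hinf
      obtain ⟨j, hj⟩ := hinf
      have hdj : ' ' :: q <+: w.drop j := hj
      obtain ⟨t, ht⟩ := hdj
      have hlen : j + 1 + q.length ≤ w.length := by
        have := congrArg List.length ht
        simp [List.length_drop] at this
        omega
      have hql : 1 ≤ q.length := by
        have := hne q hq; cases q <;> simp_all
      refine ⟨j + 1, by omega, Or.inr ?_, q, hq, ?_⟩
      · have hwd : w.drop j = ' ' :: (q ++ t) := by simpa using ht.symm
        have h0 : (w.drop j)[0]? = some ' ' := by rw [hwd]; rfl
        rw [List.getElem?_drop] at h0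
        simpa using h0
      · have hwd : w.drop j = ' ' :: (q ++ t) := by simpa using ht.symm
        have hdrop : w.drop (j + 1) = q ++ t := by
          have h2 := congrArg (List.drop 1) hwd
          simpa [List.drop_drop, Nat.add_comm] using h2
        exact hdrop ▸ ⟨t, rfl⟩

lemma pvCore (w : List Char) :
    pvLoopA w pvQWordsA =
      (if (List.range w.length).any (fun i =>
          (decide (i = 0) || decide (w[i - 1]? = some ' ')) &&
          pvQsB.any (fun q => q.isPrefixOf (w.drop i)))
       then some true else none) := by
  have hiff : pvLoopA w pvQWordsA = some true ↔
      ((List.range w.length).any (fun i =>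
          (decide (i = 0) || decide (w[i - 1]? = some ' ')) &&
          pvQsB.any (fun q => q.isPrefixOf (w.drop i))) = true) := by
    rw [pvLoopA_eq_some_true_iff, pvAnyB_iff]
    have hsame : pvQWordsA = pvQsB := rfl
    rw [hsame]
    constructor
    · rintro ⟨kw, hkw, hpre | hin⟩
      · exact ⟨kw, hkw, Or.inl ((PySem.Chars.startswith_iff w kw).mp hpre)⟩
      · exact ⟨kw, hkw, Or.inr ((PySem.Chars.isIn_iff_infix (' ' :: kw) w).mp hin)⟩
    · rintro ⟨q, hq, hpre | hinf⟩
      · exact ⟨q, hq, Or.inl ((PySem.Chars.startswith_iff w q).mpr hpre)⟩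
      · exact ⟨q, hq, Or.inr ((PySem.Chars.isIn_iff_infix (' ' :: q) w).mpr hinf)⟩
  split_ifs with h
  · exact hiff.mpr h
  · cases hA : pvLoopA w pvQWordsA with
    | none => rfl
    | some a =>
        cases a with
        | false => exact absurd hA (pvLoopA_ne_some_false w pvQWordsA)
        | true => exact absurd (hiff.mp hA) (by simp [h])

-- ===== VERDICT (by name: the statement is the Claim_ definition above) =====
theorem check_for_q_spec : Claim_equal_check_for_q := by
  intro words _
  unfold Spec_check_for_q check_for_q check_for_q_alt
  split_ifs with h
  · rfl
  · exact pvCore (PySem.Chars.lower words.toList)
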